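-- pv_equiv track=rewrite | github.com/p-karunya/NPSEconomicEffects | process.py | slugify
-- ===== SOURCE A (Python) =====
-- def slugify(columns) -> str:
--     parts = []
--     for column in columns:
--         fragment = "".join(ch.lower() if ch.isalnum() else "_" for ch in str(column))
--         fragment = fragment.strip("_")
--         if fragment:
--             parts.append(fragment)
--         if len(parts) == 3:
--             break
--     base = "_".join(parts) or "table"
--     while "__" in base:
--         base = base.replace("__", "_")
--     return base[:31]
-- ===== SOURCE B (Python) =====
-- def slugify(columns) -> str:
--     frags = []
--     for column in columns:
--         tokens = []
--         run = []
--         for ch in str(column):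
--             if ch.isalnum():
--                 run.append(ch.lower())
--             elif run:
--                 tokens.append("".join(run))
--                 run = []
--         if run:
--             tokens.append("".join(run))
--         if tokens:
--             frags.append("_".join(tokens))
--             if len(frags) == 3:
--                 break
--     return ("_".join(frags) or "table")[:31]
-- ===== Notes on version B (the rewrite author's own statement) =====
-- stated objective: alternative
-- what changed: A maps every non-alnum char to '_', strips leading/trailing underscores per column, then repeatedly replaces '__' by '_' over the joined string; B instead tokenizes each column into maximal alnum runs in one scan (lowering as it goes) and joins the tokens with single underscores, so no strip or collapse pass exists.
import Mathlib
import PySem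

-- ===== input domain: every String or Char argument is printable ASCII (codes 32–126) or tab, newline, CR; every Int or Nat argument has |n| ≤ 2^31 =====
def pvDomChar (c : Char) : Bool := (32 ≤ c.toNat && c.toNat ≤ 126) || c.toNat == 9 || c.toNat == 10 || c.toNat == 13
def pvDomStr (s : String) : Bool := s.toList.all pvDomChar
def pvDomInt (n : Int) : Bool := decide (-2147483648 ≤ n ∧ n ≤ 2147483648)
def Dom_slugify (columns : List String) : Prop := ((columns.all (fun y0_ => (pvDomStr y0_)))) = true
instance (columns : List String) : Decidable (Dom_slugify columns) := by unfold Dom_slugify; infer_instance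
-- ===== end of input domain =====

-- B replaces A's map-to-underscore + strip + while-collapse passes by one tokenizing pass over
-- each column (maximal alnum runs, lowered, joined with single '_'); same return value, no speed claim.

-- ===== PORT A =====
-- `s.replace("__", "_")` specialised to this pattern (proof-side model; stated here because the
-- port's `while "__" in base` loop cites pvReplace_length_lt for termination):
def pvRepl1 : List Char → List Char
  | [] => []
  | [c] => [c]
  | a :: b :: rest => if a = '_' ∧ b = '_' then '_' :: pvRepl1 rest else a :: pvRepl1 (b :: rest)

theorem pvGo_eq (fuel : Nat) (l acc : List Char) (h : l.length ≤ fuel) :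
    PySem.Chars.replace.go ['_','_'] ['_'] fuel l acc = acc.reverse ++ pvRepl1 l := by
  induction fuel generalizing l acc with
  | zero =>
    have : l = [] := by cases l <;> simp_all
    subst this
    rw [PySem.Chars.replace.go.eq_def]
    simp [pvRepl1]
  | succ fuel ih =>
    cases l with
    | nil => rw [PySem.Chars.replace.go.eq_def]; simp [pvRepl1]
    | cons c t =>
      rw [PySem.Chars.replace.go.eq_def]
      simp only []
      by_cases hp : List.isPrefixOf ['_','_'] (c :: t) = true
      · rw [if_pos hp]
        cases t with
        | nil => simp [List.isPrefixOf] at hp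
        | cons b t' =>
          have hc : c = '_' ∧ b = '_' := by
            simp [List.isPrefixOf] at hp; tauto
          obtain ⟨rfl, rfl⟩ := hc
          show PySem.Chars.replace.go _ _ fuel t' _ = _
          rw [ih t' _ (by simp at h; omega)]
          simp [pvRepl1]
      · rw [if_neg hp]
        rw [ih t _ (by simp at h; omega)]
        have : pvRepl1 (c :: t) = c :: pvRepl1 t := by
          cases t with
          | nil => simp [pvRepl1]
          | cons b t' =>
            rw [pvRepl1]
            rw [if_neg (by rintro ⟨rfl, rfl⟩; simp [List.isPrefixOf] at hp)]
        rw [this]; simp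

theorem pvReplace_eq (s : List Char) :
    PySem.Chars.replace s ['_','_'] ['_'] = pvRepl1 s := by
  rw [PySem.Chars.replace]
  simp only [List.isEmpty_cons, Bool.false_eq_true, if_false]
  simpa using pvGo_eq s.length s [] le_rfl

theorem pvRepl1_length_le (s : List Char) : (pvRepl1 s).length ≤ s.length := by
  fun_induction pvRepl1 s <;> simp_all <;> omega

theorem pvRepl1_length_lt (s : List Char) (h : ['_','_'] <:+: s) :
    (pvRepl1 s).length < s.length := by
  fun_induction pvRepl1 s with
  | case1 => simp at h
  | case2 c => have := h.length_le; simp at this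
  | case3 a b rest hab ih =>
    have := pvRepl1_length_le rest
    simp; omega
  | case4 a b rest hab ih =>
    have h' : ['_','_'] <:+: (b :: rest) := by
      rcases (List.infix_cons_iff.mp h) with hpre | hinf
      · exfalso
        rcases hpre with ⟨post, hp⟩
        injection hp with h1 hp; injection hp with h2 _
        exact hab ⟨h1.symm, h2.symm⟩
      · exact hinf
    have := ih h'
    simp at this ⊢; omega

theorem pvReplace_length_lt (s : List Char) (h : PySem.Chars.isIn ['_','_'] s = true) :
    (PySem.Chars.replace s ['_','_'] ['_']).length < s.length := by
  rw [pvReplace_eq]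
  exact pvRepl1_length_lt s ((PySem.Chars.isIn_iff_infix _ _).mp h)

-- fragment = "".join(ch.lower() if ch.isalnum() else "_" for ch in str(column))
def pvMapU (s : List Char) : List Char :=
  s.map (fun ch => if PySem.Chars.isalnum ch then PySem.Chars.lowerChar ch else '_')

-- while "__" in base: base = base.replace("__", "_")
def pvCollapse (base : List Char) : List Char :=
  if h : PySem.Chars.isIn ['_','_'] base = true then
    pvCollapse (PySem.Chars.replace base ['_','_'] ['_'])
  else base
termination_by base.length
decreasing_by exact pvReplace_length_lt base h

-- the for-loop: append each nonempty stripped fragment, break once parts has 3 entries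
def pvALoop : List String → List (List Char) → List (List Char)
  | [], parts => parts
  | column :: rest, parts =>
    let fragment := PySem.Chars.stripChars (pvMapU column.toList) ['_']
    let parts' := if fragment = [] then parts else parts ++ [fragment]
    if parts'.length = 3 then parts' else pvALoop rest parts'

def slugify (columns : List String) : String :=
  let parts := pvALoop columns []
  let joined := PySem.Chars.join ['_'] parts
  let base := if joined = [] then "table".toList else joined
  String.ofList (PySem.Chars.slice (pvCollapse base) none (some 31))

-- ===== PORT B =====
-- inner loop of B: accumulate the current alnum run (lowered), flush it on a non-alnum char
def pvTokGo : List Char → List Char → List (List Char) → List (List Char)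
  | [], run, tokens => if run = [] then tokens else tokens ++ [run]
  | ch :: rest, run, tokens =>
    if PySem.Chars.isalnum ch then pvTokGo rest (run ++ [PySem.Chars.lowerChar ch]) tokens
    else if run = [] then pvTokGo rest run tokens
    else pvTokGo rest [] (tokens ++ [run])

def pvBLoop : List String → List (List Char) → List (List Char)
  | [], frags => frags
  | column :: rest, frags =>
    let tokens := pvTokGo column.toList [] []
    if tokens = [] then pvBLoop rest frags
    else
      let frags' := frags ++ [PySem.Chars.join ['_'] tokens]
      if frags'.length = 3 then frags' else pvBLoop rest frags'

def slugify_alt (columns : List String) : String :=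
  let frags := pvBLoop columns []
  let joined := PySem.Chars.join ['_'] frags
  String.ofList (PySem.Chars.slice (if joined = [] then "table".toList else joined) none (some 31))

-- ===== PRECONDITION & SPEC =====
def Spec_slugify (columns : List String) (out : String) : Prop := out = slugify_alt columns
instance (columns : List String) (out : String) : Decidable (Spec_slugify columns out) := by unfold Spec_slugify; infer_instance

-- ===== CLAIM (what is proved, stated in full; the proofs are below) =====
def Claim_equal_slugify : Prop := ∀ (columns : List String), Dom_slugify columns → Spec_slugify columns (slugify columns)

-- ===== LEMMAS AND PROOFS =====

-- the fixpoint of the replace loop: drop every '_' that is immediately followed by another '_'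
def pvN : List Char → List Char
  | [] => []
  | [c] => [c]
  | a :: b :: rest => if a = '_' ∧ b = '_' then pvN (b :: rest) else a :: pvN (b :: rest)

-- what B's run/flush scan leaves of a string whose non-alnum chars were mapped to '_'
def pvFinish : List Char → List Char → List (List Char)
  | run, [] => if run = [] then [] else [run]
  | run, c :: rest =>
    if c = '_' then (if run = [] then pvFinish [] rest else [run] ++ pvFinish [] rest)
    else pvFinish (run ++ [c]) rest

def pvP (c : Char) : Bool := c == '_'

theorem pvRepl1_head (s : List Char) : (pvRepl1 s).head? = s.head? := by
  fun_induction pvRepl1 s <;> simp_all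

theorem pvN_head (s : List Char) : (pvN s).head? = s.head? := by
  fun_induction pvN s <;> simp_all

theorem pvN_no_infix (s : List Char) (h : ¬ ['_','_'] <:+: s) : pvN s = s := by
  fun_induction pvN s with
  | case1 => rfl
  | case2 c => rfl
  | case3 a b rest hab ih =>
    exfalso; apply h
    obtain ⟨rfl, rfl⟩ := hab
    exact ⟨[], rest, rfl⟩
  | case4 a b rest hab ih =>
    rw [ih (fun hinf => h (hinf.trans (List.suffix_cons a _).isInfix))]

theorem pvN_cons (c : Char) (xs ys : List Char) (hh : xs.head? = ys.head?)
    (h : pvN xs = pvN ys) : pvN (c :: xs) = pvN (c :: ys) := by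
  cases xs with
  | nil => cases ys with
    | nil => rfl
    | cons y ys' => simp at hh
  | cons x xs' => cases ys with
    | nil => simp at hh
    | cons y ys' =>
      simp at hh; obtain ⟨rfl⟩ := hh
      rw [pvN, pvN]
      by_cases hc : c = '_' ∧ x = '_'
      · rw [if_pos hc, if_pos hc, h]
      · rw [if_neg hc, if_neg hc, h]

theorem pvN_repl1 (s : List Char) : pvN (pvRepl1 s) = pvN s := by
  fun_induction pvRepl1 s with
  | case1 => rfl
  | case2 c => rfl
  | case3 a b rest hab ih =>
    obtain ⟨rfl, rfl⟩ := hab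
    rw [show pvN ('_'::'_'::rest) = pvN ('_'::rest) from by rw [pvN]; simp]
    exact pvN_cons '_' _ _ (pvRepl1_head rest) ih
  | case4 a b rest hab ih =>
    exact pvN_cons a _ _ (pvRepl1_head (b::rest)) ih

theorem pvCollapse_eq_pvN (s : List Char) : pvCollapse s = pvN s := by
  fun_induction pvCollapse s with
  | case1 s h ih => rw [ih, pvReplace_eq, pvN_repl1]
  | case2 s h =>
    rw [pvN_no_infix s (fun hinf => h ((PySem.Chars.isIn_iff_infix _ _).mpr hinf))]

theorem pvN_cons_ne (c : Char) (rest : List Char) (hc : c ≠ '_') :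
    pvN (c :: rest) = c :: pvN rest := by
  cases rest with
  | nil => rfl
  | cons b r => rw [pvN, if_neg (by tauto)]

theorem pvN_underscore (s : List Char) : pvN ('_' :: s) = '_' :: pvN (s.dropWhile pvP) := by
  induction s with
  | nil => rfl
  | cons c rest ih =>
    by_cases hc : c = '_'
    · subst hc
      rw [show pvN ('_'::'_'::rest) = pvN ('_'::rest) from by rw [pvN]; simp, ih]
      simp [pvP]
    · have hd : List.dropWhile pvP (c :: rest) = c :: rest := by
        simp [pvP, hc]
      rw [hd, show pvN ('_'::c::rest) = '_' :: pvN (c::rest) from by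
        rw [pvN, if_neg (by tauto)]]

theorem pvN_append (s t : List Char) (hs : s ≠ []) (hl : s.getLast? ≠ some '_') :
    pvN (s ++ t) = pvN s ++ pvN t := by
  induction s with
  | nil => simp at hs
  | cons a s' ih =>
    cases s' with
    | nil =>
      simp at hl
      cases t with
      | nil => simp [pvN]
      | cons b t' =>
        simp only [List.cons_append, List.nil_append]
        rw [show pvN (a::b::t') = a :: pvN (b::t') from by rw [pvN, if_neg (by tauto)]]
        rfl
    | cons b s'' =>
      have hl' : (b :: s'').getLast? ≠ some '_' := by
        rwa [List.getLast?_cons_cons] at hl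
      have ih' := ih (by simp) hl'
      simp only [List.cons_append] at ih' ⊢
      by_cases hab : a = '_' ∧ b = '_'
      · rw [show pvN (a::b::(s''++t)) = pvN (b::(s''++t)) from by rw [pvN, if_pos hab], ih',
          show pvN (a::b::s'') = pvN (b::s'') from by rw [pvN, if_pos hab]]
      · rw [show pvN (a::b::(s''++t)) = a :: pvN (b::(s''++t)) from by rw [pvN, if_neg hab], ih',
          show pvN (a::b::s'') = a :: pvN (b::s'') from by rw [pvN, if_neg hab]]
        simp

theorem pvLower_ne_underscore (c : Char) (h : PySem.Chars.isalnum c = true) :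
    PySem.Chars.lowerChar c ≠ '_' := by
  have hle : ∀ a b : Char, (a ≤ b) ↔ a.toNat ≤ b.toNat := fun a b => ge_iff_le
  have hA : ('A').toNat = 65 := by decide
  have hZ : ('Z').toNat = 90 := by decide
  have ha : ('a').toNat = 97 := by decide
  have hz : ('z').toNat = 122 := by decide
  have h0 : ('0').toNat = 48 := by decide
  have h9 : ('9').toNat = 57 := by decide
  have hU : ('_').toNat = 95 := by decide
  simp only [PySem.Chars.isalnum, PySem.Chars.isalpha, PySem.Chars.isdigit, PySem.Chars.isupper,
    PySem.Chars.islower, hle, hA, hZ, ha, hz, h0, h9, Bool.or_eq_true, Bool.and_eq_true,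
    decide_eq_true_eq] at h
  rw [PySem.Chars.lowerChar, PySem.Chars.isupper]
  by_cases hu : (65 ≤ c.toNat ∧ c.toNat ≤ 90)
  · rw [if_pos (by simp only [Bool.and_eq_true, decide_eq_true_eq, hle, hA, hZ]; exact hu)]
    intro heq
    have h2 := congrArg Char.toNat heq
    rw [Char.toNat_ofNat, if_pos (by constructor; omega)] at h2
    omega
  · rw [if_neg (by simp only [Bool.and_eq_true, decide_eq_true_eq, hle, hA, hZ]; exact fun hc => hu hc)]
    intro heq
    have h2 := congrArg Char.toNat heq
    omega

theorem pvTokGo_eq (s : List Char) : ∀ (run : List Char) (tokens : List (List Char)),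
    pvTokGo s run tokens = tokens ++ pvFinish run (pvMapU s) := by
  induction s with
  | nil => intro run tokens; rw [pvTokGo, pvMapU]; simp only [List.map_nil, pvFinish]; split <;> simp
  | cons c rest ih =>
    intro run tokens
    rw [pvTokGo, pvMapU]
    simp only [List.map_cons]
    by_cases hc : PySem.Chars.isalnum c = true
    · rw [if_pos hc, ih, show (if PySem.Chars.isalnum c = true then PySem.Chars.lowerChar c else '_') = PySem.Chars.lowerChar c from if_pos hc,
        pvFinish, if_neg (pvLower_ne_underscore c hc)]
      rfl
    · rw [if_neg hc, show (if PySem.Chars.isalnum c = true then PySem.Chars.lowerChar c else '_') = '_' from if_neg hc,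
        pvFinish, if_pos rfl]
      by_cases hr : run = []
      · rw [if_pos hr, if_pos hr, hr, ih]; rfl
      · rw [if_neg hr, if_neg hr, ih]; simp [pvMapU]

theorem pvFinish_ne_nil (u : List Char) : ∀ run, run ≠ [] → pvFinish run u ≠ [] := by
  induction u with
  | nil => intro run h; rw [pvFinish, if_neg h]; simp
  | cons c rest ih =>
    intro run h
    rw [pvFinish]
    by_cases hc : c = '_'
    · rw [if_pos hc, if_neg h]; simp
    · rw [if_neg hc]; exact ih _ (by simp)

theorem pvFinish_nil_iff (u : List Char) : pvFinish [] u = [] ↔ ∀ c ∈ u, c = '_' := by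
  induction u with
  | nil => simp [pvFinish]
  | cons c rest ih =>
    rw [pvFinish]
    by_cases hc : c = '_'
    · rw [if_pos hc, if_pos rfl]; simp [hc, ih]
    · rw [if_neg hc]
      simp only [List.mem_cons]
      constructor
      · intro h; exact absurd h (pvFinish_ne_nil rest _ (by simp))
      · intro h; exact absurd (h c (Or.inl rfl)) hc

theorem pvFinish_dropWhile (u : List Char) : pvFinish [] (u.dropWhile pvP) = pvFinish [] u := by
  induction u with
  | nil => rfl
  | cons c rest ih =>
    by_cases hc : c = '_'
    · subst hc
      rw [List.dropWhile_cons, show pvP '_' = true from rfl, if_pos rfl, ih, pvFinish]; simp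
    · rw [List.dropWhile_cons, show pvP c = false from by simp [pvP, hc], if_neg (by simp)]

theorem pvFinish_append_underscore (u : List Char) : ∀ run,
    pvFinish run (u ++ ['_']) = pvFinish run u := by
  induction u with
  | nil =>
    intro run
    simp only [List.nil_append]
    by_cases hr : run = [] <;> simp [hr, pvFinish]
  | cons c rest ih =>
    intro run
    simp only [List.cons_append]
    rw [pvFinish, pvFinish]
    by_cases hc : c = '_'
    · rw [if_pos hc, if_pos hc]
      by_cases hr : run = [] <;> simp [hr, ih]
    · rw [if_neg hc, if_neg hc, ih]

theorem pvFinish_append_replicate (u : List Char) (k : Nat) :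
    pvFinish [] (u ++ List.replicate k '_') = pvFinish [] u := by
  induction k generalizing u with
  | zero => simp
  | succ k ih =>
    rw [List.replicate_succ, show u ++ ('_' :: List.replicate k '_') = (u ++ ['_']) ++ List.replicate k '_' from by simp,
      ih, pvFinish_append_underscore]

theorem pvHead?_dropWhile (p : Char → Bool) (l : List Char) (x : Char)
    (h : (List.dropWhile p l).head? = some x) : p x = false := by
  induction l with
  | nil => simp at h
  | cons c t ih =>
    rw [List.dropWhile_cons] at h
    by_cases hc : p c = true
    · rw [if_pos hc] at h; exact ih h
    · rw [if_neg hc] at h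
      simp only [List.head?_cons, Option.some.injEq] at h
      subst h; simpa using hc

-- stripChars with the single char '_', in dropWhile form
theorem pvStrip_eq (u : List Char) :
    PySem.Chars.stripChars u ['_'] = ((u.dropWhile pvP).reverse.dropWhile pvP).reverse := by
  have hp : (fun c => List.contains ['_'] c) = pvP := by
    funext c; by_cases hc : c = '_' <;> simp [pvP, hc]
  simp only [PySem.Chars.stripChars, hp]

theorem pvStrip_nil_iff (u : List Char) :
    PySem.Chars.stripChars u ['_'] = [] ↔ ∀ c ∈ u, c = '_' := by
  rw [pvStrip_eq]
  simp only [List.reverse_eq_nil_iff, List.dropWhile_eq_nil_iff, List.mem_reverse, pvP]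
  constructor
  · intro h c hc
    by_cases hd : c ∈ List.dropWhile pvP u
    · simpa using h c hd
    · have := List.takeWhile_append_dropWhile (p := pvP) (l := u)
      rw [← this] at hc
      rcases List.mem_append.mp hc with h1 | h2
      · have := List.mem_takeWhile_imp h1
        simpa [pvP] using this
      · exact absurd h2 hd
  · intro h c hc
    have : c ∈ u := (List.dropWhile_suffix pvP).subset hc
    simpa using h c this

theorem pvStrip_getLast (u : List Char) : (PySem.Chars.stripChars u ['_']).getLast? ≠ some '_' := by
  rw [pvStrip_eq, List.getLast?_reverse]
  intro h
  have := pvHead?_dropWhile pvP _ '_' h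
  simp [pvP] at this

theorem pvStrip_head (u : List Char) : (PySem.Chars.stripChars u ['_']).head? ≠ some '_' := by
  rw [pvStrip_eq]
  intro h
  rw [List.head?_reverse] at h
  obtain ⟨pre, hpre⟩ := List.dropWhile_suffix (l := (List.dropWhile pvP u).reverse) pvP
  cases hd : List.dropWhile pvP (List.dropWhile pvP u).reverse with
  | nil => rw [hd] at h; simp at h
  | cons x xs =>
    rw [hd] at h hpre
    have hv : ((List.dropWhile pvP u).reverse).getLast? = some '_' := by
      rw [← hpre, List.getLast?_append, h]
      rfl
    rw [List.getLast?_reverse] at hv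
    have := pvHead?_dropWhile pvP u '_' hv
    simp [pvP] at this

theorem pvFinish_strip (u : List Char) :
    pvFinish [] (PySem.Chars.stripChars u ['_']) = pvFinish [] u := by
  rw [pvStrip_eq]
  set w := List.dropWhile pvP u with hw
  have hdecomp : w = ((w.reverse.dropWhile pvP).reverse) ++ (w.reverse.takeWhile pvP).reverse := by
    have h2 := congrArg List.reverse (List.takeWhile_append_dropWhile (p := pvP) (l := w.reverse))
    rw [List.reverse_append, List.reverse_reverse] at h2
    exact h2.symm
  have hrep : ∃ k, (w.reverse.takeWhile pvP).reverse = List.replicate k '_' := by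
    refine ⟨(w.reverse.takeWhile pvP).reverse.length, ?_⟩
    apply List.eq_replicate_of_mem
    intro c hc
    have := List.mem_takeWhile_imp (List.mem_reverse.mp hc)
    simpa [pvP] using this
  obtain ⟨k, hk⟩ := hrep
  calc pvFinish [] (w.reverse.dropWhile pvP).reverse
      = pvFinish [] ((w.reverse.dropWhile pvP).reverse ++ List.replicate k '_') := by
        rw [pvFinish_append_replicate]
    _ = pvFinish [] w := by rw [← hk, ← hdecomp]
    _ = pvFinish [] u := by rw [hw, pvFinish_dropWhile]

theorem pvJoin_cons (a : List Char) (ts : List (List Char)) (h : ts ≠ []) :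
    PySem.Chars.join ['_'] (a :: ts) = a ++ '_' :: PySem.Chars.join ['_'] ts := by
  cases ts with
  | nil => exact absurd rfl h
  | cons b r => simp [PySem.Chars.join, List.intercalate, List.intersperse]

theorem pvJoin_singleton (a : List Char) : PySem.Chars.join ['_'] [a] = a := by
  simp [PySem.Chars.join, List.intercalate]

theorem pvJoin_nil : PySem.Chars.join ['_'] [] = [] := by
  simp [PySem.Chars.join, List.intercalate]

-- the central lemma: '_'-joining the tokens of a string collapses its underscore runs
theorem pvG : ∀ (n : Nat) (u : List Char), u.length ≤ n → u.getLast? ≠ some '_' →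
    (PySem.Chars.join ['_'] (pvFinish [] u) = pvN (u.dropWhile pvP) ∧
     ∀ run, run ≠ [] → PySem.Chars.join ['_'] (pvFinish run u) = run ++ pvN u) := by
  intro n
  induction n with
  | zero =>
    intro u hu _
    have : u = [] := by cases u <;> simp_all
    subst this
    refine ⟨by simp [pvFinish, pvN], ?_⟩
    intro run hr
    rw [pvFinish, if_neg hr, pvJoin_singleton]
    simp [pvN]
  | succ n ih =>
    intro u hu hl
    cases u with
    | nil =>
      refine ⟨by simp [pvFinish, pvN], ?_⟩
      intro run hr
      rw [pvFinish, if_neg hr, pvJoin_singleton]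
      simp [pvN]
    | cons c rest =>
      by_cases hc : c = '_'
      · subst hc
        have hrest : rest ≠ [] := by
          intro h; subst h; simp at hl
        have hlr : rest.getLast? ≠ some '_' := by
          cases rest with
          | nil => simp
          | cons b r => rwa [List.getLast?_cons_cons] at hl
        have ihr := ih rest (by simp at hu; omega) hlr
        constructor
        · rw [pvFinish, if_pos rfl, if_pos rfl, List.dropWhile_cons,
            show pvP '_' = true from rfl, if_pos rfl]
          exact ihr.1
        · intro run hr
          rw [pvFinish, if_pos rfl, if_neg hr]
          have hts : pvFinish [] rest ≠ [] := by
            rw [ne_eq, pvFinish_nil_iff]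
            intro hall
            have hm := List.getLast_mem hrest
            have hlast := hall _ hm
            exact hlr (by rw [List.getLast?_eq_some_getLast hrest, hlast])
          rw [show [run] ++ pvFinish [] rest = run :: pvFinish [] rest from rfl,
            pvJoin_cons run _ hts, ihr.1, pvN_underscore]
      · have hd : List.dropWhile pvP (c :: rest) = c :: rest := by
          simp [pvP, hc]
        by_cases hrne : rest = []
        · subst hrne
          constructor
          · rw [pvFinish, if_neg hc, pvFinish, if_neg (by simp), pvJoin_singleton, hd]
            rfl
          · intro run hr
            rw [pvFinish, if_neg hc, pvFinish, if_neg (by simp), pvJoin_singleton]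
            simp [pvN]
        · have hlr : rest.getLast? ≠ some '_' := by
            cases rest with
            | nil => simp
            | cons b r => rwa [List.getLast?_cons_cons] at hl
          have ihr := ih rest (by simp at hu; omega) hlr
          constructor
          · rw [pvFinish, if_neg hc, show ([]:List Char) ++ [c] = [c] from rfl,
              ihr.2 [c] (by simp), hd, pvN_cons_ne c rest hc]
            rfl
          · intro run hr
            rw [pvFinish, if_neg hc, ihr.2 (run ++ [c]) (by simp), pvN_cons_ne c rest hc]
            simp

-- per-column summary: A's stripped fragment is empty iff B's token list is, and B's joined
-- tokens are the collapse of A's fragment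
theorem pvCol (s : List Char) :
    (PySem.Chars.stripChars (pvMapU s) ['_'] = [] ↔ pvTokGo s [] [] = []) ∧
    PySem.Chars.join ['_'] (pvTokGo s [] []) = pvN (PySem.Chars.stripChars (pvMapU s) ['_']) := by
  have htok : pvTokGo s [] [] = pvFinish [] (pvMapU s) := by
    rw [pvTokGo_eq]; rfl
  constructor
  · rw [htok, pvStrip_nil_iff, pvFinish_nil_iff]
  · rw [htok, ← pvFinish_strip (pvMapU s)]
    set fA := PySem.Chars.stripChars (pvMapU s) ['_'] with hfa
    have h1 := (pvG fA.length fA le_rfl (pvStrip_getLast (pvMapU s))).1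
    have h2 : List.dropWhile pvP fA = fA := by
      cases hf : fA with
      | nil => rfl
      | cons x xs =>
        rw [List.dropWhile_cons, if_neg ?_]
        have := pvStrip_head (pvMapU s)
        rw [← hfa, hf] at this
        simp only [List.head?_cons, ne_eq, Option.some.injEq] at this
        simp [pvP, this]
    rw [h1, h2]

theorem pvN_join (parts : List (List Char))
    (h : ∀ p ∈ parts, p ≠ [] ∧ p.head? ≠ some '_' ∧ p.getLast? ≠ some '_') :
    pvN (PySem.Chars.join ['_'] parts) = PySem.Chars.join ['_'] (parts.map pvN) := by
  induction parts with
  | nil => simp [pvN]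
  | cons p ps ih =>
    cases ps with
    | nil => simp
    | cons q qs =>
      obtain ⟨hp1, hp2, hp3⟩ := h p (by simp)
      obtain ⟨hq1, hq2, hq3⟩ := h q (by simp)
      have ih' := ih (fun x hx => h x (List.mem_cons_of_mem p hx))
      rw [pvJoin_cons p _ (by simp), pvN_append p _ hp1 hp3]
      have hjq : PySem.Chars.join ['_'] (q :: qs) ≠ [] ∧
          (PySem.Chars.join ['_'] (q :: qs)).head? = q.head? := by
        cases qs with
        | nil => rw [pvJoin_singleton]; exact ⟨hq1, rfl⟩
        | cons r rs =>
          rw [pvJoin_cons q _ (by simp)]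
          cases q with
          | nil => exact absurd rfl hq1
          | cons z zs => simp
      have hnu : pvN ('_' :: PySem.Chars.join ['_'] (q :: qs)) =
          '_' :: pvN (PySem.Chars.join ['_'] (q :: qs)) := by
        rw [pvN_underscore]
        congr 1
        cases hj : PySem.Chars.join ['_'] (q :: qs) with
        | nil => rfl
        | cons z zs =>
          rw [List.dropWhile_cons, if_neg ?_]
          have := hjq.2
          rw [hj] at this
          simp only [List.head?_cons] at this
          have hz : some z = q.head? := this
          simp only [pvP]
          intro hb
          apply hq2
          rw [← hz]
          have : z = '_' := by simpa using hb
          rw [this]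
      rw [hnu, ih',
        show List.map pvN (p :: q :: qs) = pvN p :: pvN q :: List.map pvN qs from rfl,
        pvJoin_cons (pvN p) _ (by simp),
        show (pvN q :: List.map pvN qs) = List.map pvN (q :: qs) from rfl]

def pvGood (p : List Char) : Prop := p ≠ [] ∧ p.head? ≠ some '_' ∧ p.getLast? ≠ some '_'

theorem pvLoop (cols : List String) : ∀ (acc : List (List Char)), acc.length < 3 →
    (∀ p ∈ acc, pvGood p) →
    (pvBLoop cols (acc.map pvN) = (pvALoop cols acc).map pvN ∧
     ∀ p ∈ pvALoop cols acc, pvGood p) := by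
  induction cols with
  | nil => intro acc _ hg; exact ⟨rfl, hg⟩
  | cons col rest ih =>
    intro acc hlen hg
    rw [pvALoop, pvBLoop]
    obtain ⟨hiff, hjoin⟩ := pvCol col.toList
    set fA := PySem.Chars.stripChars (pvMapU col.toList) ['_'] with hfa
    by_cases hf : fA = []
    · rw [if_pos hf, if_pos (hiff.mp hf)]
      rw [if_neg (by omega)]
      exact ih acc hlen hg
    · rw [if_neg hf, if_neg (fun ht => hf (hiff.mpr ht))]
      have hgood : pvGood fA := ⟨hf, pvStrip_head _, pvStrip_getLast _⟩
      have hgood' : ∀ p ∈ acc ++ [fA], pvGood p := by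
        intro p hp
        rcases List.mem_append.mp hp with h1 | h2
        · exact hg p h1
        · simp at h2; subst h2; exact hgood
      have hmap : acc.map pvN ++ [PySem.Chars.join ['_'] (pvTokGo col.toList [] [])] =
          (acc ++ [fA]).map pvN := by
        rw [hjoin, List.map_append, List.map_cons, List.map_nil]
      rw [hmap]
      by_cases h3 : (acc ++ [fA]).length = 3
      · rw [if_pos h3, if_pos (by simpa using h3)]
        exact ⟨rfl, hgood'⟩
      · rw [if_neg h3, if_neg (by simpa using h3)]
        exact ih (acc ++ [fA]) (by simp at h3 ⊢; omega) hgood'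

theorem pvJoin_ne_nil (parts : List (List Char)) (hne : parts ≠ [])
    (h : ∀ p ∈ parts, p ≠ []) : PySem.Chars.join ['_'] parts ≠ [] := by
  cases parts with
  | nil => exact absurd rfl hne
  | cons p ps =>
    cases ps with
    | nil => rw [pvJoin_singleton]; exact h p (by simp)
    | cons q qs =>
      rw [pvJoin_cons p _ (by simp)]
      have := h p (by simp)
      cases p with
      | nil => exact absurd rfl this
      | cons z zs => simp

-- ===== VERDICT (by name: the statement is the Claim_ definition above) =====
theorem slugify_spec : Claim_equal_slugify := by
  intro columns _
  show slugify columns = slugify_alt columns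
  rw [slugify, slugify_alt]
  obtain ⟨hB, hgood⟩ := pvLoop columns [] (by simp) (by simp)
  simp only [List.map_nil] at hB
  set parts := pvALoop columns [] with hparts
  rw [hB]
  by_cases hp : parts = []
  · rw [hp]
    simp only [List.map_nil]
    rw [pvJoin_nil, pvCollapse_eq_pvN]
    norm_num
    decide
  · have hne : ∀ p ∈ parts, p ≠ [] := fun p h => (hgood p h).1
    have hjA : PySem.Chars.join ['_'] parts ≠ [] := pvJoin_ne_nil parts hp hne
    have hjB : PySem.Chars.join ['_'] (parts.map pvN) ≠ [] := by
      apply pvJoin_ne_nil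
      · simpa using hp
      · intro p hpm
        obtain ⟨q, hq, hqe⟩ := List.mem_map.mp hpm
        subst hqe
        intro hnil
        have hh := pvN_head q
        rw [hnil] at hh
        cases q with
        | nil => exact (hne [] hq) rfl
        | cons z zs => simp at hh
    rw [if_neg hjA, if_neg hjB, pvCollapse_eq_pvN,
      pvN_join parts (fun p h => hgood p h)]
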